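-- pv_equiv track=rewrite | github.com/gcoan/batpred | apps/predbat/plan.py | max_charge_windows
-- ===== SOURCE A (Python) =====
-- def max_charge_windows(end_record_abs, charge_window):
--     """
--     Work out how many charge windows the time period covers
--     """
--     charge_windows = 0
--     window_n = 0
--     for window in charge_window:
--         if end_record_abs >= window["end"]:
--             charge_windows = window_n + 1
--         window_n += 1
--     return charge_windows
-- ===== SOURCE B (Python) =====
-- def max_charge_windows(end_record_abs, charge_window):
--     """
--     Work out how many charge windows the time period covers
--     """
--     for i, window in reversed(list(enumerate(charge_window))):
--         if end_record_abs >= window["end"]: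
--             return i + 1
--     return 0
-- ===== Notes on version B (the rewrite author's own statement) =====
-- stated objective: alternative
-- what changed: Replaced the forward sweep that keeps overwriting an accumulator with a reverse scan over the enumerated windows that returns the first (i.e. highest) qualifying index + 1 immediately, short-circuiting instead of always visiting every window.
import Mathlib
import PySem

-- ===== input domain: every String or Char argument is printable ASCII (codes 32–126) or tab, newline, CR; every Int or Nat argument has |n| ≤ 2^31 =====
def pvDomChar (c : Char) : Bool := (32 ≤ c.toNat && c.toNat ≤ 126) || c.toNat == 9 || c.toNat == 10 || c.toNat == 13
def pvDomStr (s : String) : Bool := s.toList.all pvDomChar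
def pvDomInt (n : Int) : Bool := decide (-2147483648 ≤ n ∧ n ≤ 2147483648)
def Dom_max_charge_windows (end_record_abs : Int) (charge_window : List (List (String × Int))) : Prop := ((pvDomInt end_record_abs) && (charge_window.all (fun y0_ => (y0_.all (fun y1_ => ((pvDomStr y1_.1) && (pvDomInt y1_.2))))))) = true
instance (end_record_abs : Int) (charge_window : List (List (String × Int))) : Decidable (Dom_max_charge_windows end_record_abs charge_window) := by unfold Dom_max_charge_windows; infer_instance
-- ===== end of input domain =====

-- B replaces A's forward sweep with an accumulator by a reverse scan over the
-- enumerated windows that returns on the first (highest) qualifying index (objective: alternative).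

-- ===== PORT A =====
-- forward loop: state = (charge_windows, window_n); window["end"] ported as
-- first-match lookup with default 0 (Pre_ guarantees the key is present, so the
-- default is never used on admitted inputs)
def max_charge_windows (end_record_abs : Int) (charge_window : List (List (String × Int))) : Int :=
  (charge_window.foldl
    (fun (st : Int × Int) w =>
      (if end_record_abs ≥ ((w.lookup "end").getD 0) then st.2 + 1 else st.1, st.2 + 1))
    (0, 0)).1

-- ===== PORT B =====
-- Source B's loop: walk reversed(list(enumerate(charge_window))), return i+1 on first match
def mcwFindBack (end_record_abs : Int) : List (Int × List (String × Int)) → Int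
  | [] => 0
  | (i, w) :: rest =>
      if end_record_abs ≥ ((w.lookup "end").getD 0) then i + 1
      else mcwFindBack end_record_abs rest

def max_charge_windows_alt (end_record_abs : Int) (charge_window : List (List (String × Int))) : Int :=
  mcwFindBack end_record_abs (PySem.List.enumerate charge_window).reverse

-- ===== PRECONDITION & SPEC =====
-- Pre_ excludes exactly the inputs where Python A raises KeyError: a window without an "end" key.
def Pre_max_charge_windows (end_record_abs : Int) (charge_window : List (List (String × Int))) : Prop :=
  ∀ w ∈ charge_window, (w.lookup "end").isSome
instance (end_record_abs : Int) (charge_window : List (List (String × Int))) : Decidable (Pre_max_charge_windows end_record_abs charge_window) := by unfold Pre_max_charge_windows; infer_instance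
def pvWitness_max_charge_windows : Int × (List (List (String × Int))) := (5, [[("end", 3)], [("end", 9)]])

def Spec_max_charge_windows (end_record_abs : Int) (charge_window : List (List (String × Int))) (out : Int) : Prop := out = max_charge_windows_alt end_record_abs charge_window
instance (end_record_abs : Int) (charge_window : List (List (String × Int))) (out : Int) : Decidable (Spec_max_charge_windows end_record_abs charge_window out) := by unfold Spec_max_charge_windows; infer_instance

-- ===== CLAIM (what is proved, stated in full; the proofs are below) =====
def Claim_equal_max_charge_windows : Prop := ∀ (end_record_abs : Int) (charge_window : List (List (String × Int))), Dom_max_charge_windows end_record_abs charge_window → Pre_max_charge_windows end_record_abs charge_window → Spec_max_charge_windows end_record_abs charge_window (max_charge_windows end_record_abs charge_window)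

-- ===== LEMMAS AND PROOFS =====

-- generic-base version of mcwFindBack, for the induction
def mcwAux (e : Int) (c : Int) : List (Int × List (String × Int)) → Int
  | [] => c
  | (i, w) :: rest => if e ≥ ((w.lookup "end").getD 0) then i + 1 else mcwAux e c rest

theorem mcwAux_zero (e : Int) (l : List (Int × List (String × Int))) :
    mcwAux e 0 l = mcwFindBack e l := by
  induction l with
  | nil => rfl
  | cons p rest ih => cases p; simp [mcwAux, mcwFindBack, ih]

theorem mcw_foldl_snd (e : Int) (l : List (List (String × Int))) (c n : Int) :
    (l.foldl
      (fun (st : Int × Int) w =>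
        (if e ≥ ((w.lookup "end").getD 0) then st.2 + 1 else st.1, st.2 + 1))
      (c, n)).2 = n + l.length := by
  induction l generalizing c n with
  | nil => simp
  | cons w rest ih =>
      simp only [List.foldl_cons, ih, List.length_cons]
      push_cast; ring

theorem mcw_foldl_eq_aux (e : Int) (l : List (List (String × Int))) (c n : Int) :
    (l.foldl
      (fun (st : Int × Int) w =>
        (if e ≥ ((w.lookup "end").getD 0) then st.2 + 1 else st.1, st.2 + 1))
      (c, n)).1 = mcwAux e c (PySem.List.enumerate l n).reverse := by
  induction l using List.reverseRecOn generalizing c n with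
  | nil => simp [PySem.List.enumerate_nil, mcwAux]
  | append_singleton l w ih =>
      rw [List.foldl_append, PySem.List.enumerate_append]
      simp only [List.foldl_cons, List.foldl_nil, PySem.List.enumerate_cons,
        PySem.List.enumerate_nil, List.reverse_append, List.reverse_cons,
        List.reverse_nil, List.nil_append, List.cons_append]
      rw [mcwAux]
      by_cases h : e ≥ ((w.lookup "end").getD 0)
      · simp only [h, if_pos]
        rw [mcw_foldl_snd]
      · simp only [h, if_neg, not_false_iff]
        simpa using ih c n

-- ===== VERDICT (by name: the statement is the Claim_ definition above) =====
theorem max_charge_windows_spec : Claim_equal_max_charge_windows := by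
  intro e cw _ _
  unfold Spec_max_charge_windows max_charge_windows max_charge_windows_alt
  rw [mcw_foldl_eq_aux, mcwAux_zero]
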